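-- pv_equiv track=rewrite | github.com/Matchoc/stock_analysis_py | disnat.py | gather_combine_data
-- ===== SOURCE A (Python) =====
-- def gather_combine_data(data):
-- 	companies = sorted(list(data.keys()))
-- 	header = [["ticker"] + [x for x in companies]]
-- 	results = []
-- 	processed = []
-- 	for cie in companies:
-- 		cur_year = sorted(list(data[cie].keys()))[-1]
-- 		for measure in data[cie][cur_year]:
-- 			if measure not in processed:
-- 				processed.append(measure)
-- 				results.append([measure])
-- 				for cie2 in companies:
-- 					cie2_year = sorted(list(data[cie2].keys()))[-1]
-- 					if measure in data[cie2][cie2_year]: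
-- 						results[-1].append(data[cie2][cie2_year][measure])
-- 					else:
-- 						results[-1].append("N/A")
--
-- 	return header + results
-- ===== SOURCE B (Python) =====
-- def gather_combine_data(data):
-- 	companies = sorted(data)
-- 	rows = {}
-- 	i = 0
-- 	for c in companies:
-- 		d = data[c][sorted(data[c])[-1]]
-- 		for m in rows:
-- 			rows[m].append(d.get(m, "N/A"))
-- 		for m, v in d.items():
-- 			if m not in rows:
-- 				rows[m] = ["N/A"] * i + [v]
-- 		i += 1
-- 	return [["ticker"] + companies] + [[m] + vs for m, vs in rows.items()]
-- ===== Notes on version B (the rewrite author's own statement) =====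
-- stated objective: faster
-- what changed: B streams over the sorted companies once, maintaining an ordered measure->row-so-far table: existing rows get the current company's value (or N/A) appended and each newly seen measure starts a row backfilled with N/A, so A's per-measure rescan of all companies (with its re-sorting of every company's years and linear 'processed' membership test) disappears.
import Mathlib
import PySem

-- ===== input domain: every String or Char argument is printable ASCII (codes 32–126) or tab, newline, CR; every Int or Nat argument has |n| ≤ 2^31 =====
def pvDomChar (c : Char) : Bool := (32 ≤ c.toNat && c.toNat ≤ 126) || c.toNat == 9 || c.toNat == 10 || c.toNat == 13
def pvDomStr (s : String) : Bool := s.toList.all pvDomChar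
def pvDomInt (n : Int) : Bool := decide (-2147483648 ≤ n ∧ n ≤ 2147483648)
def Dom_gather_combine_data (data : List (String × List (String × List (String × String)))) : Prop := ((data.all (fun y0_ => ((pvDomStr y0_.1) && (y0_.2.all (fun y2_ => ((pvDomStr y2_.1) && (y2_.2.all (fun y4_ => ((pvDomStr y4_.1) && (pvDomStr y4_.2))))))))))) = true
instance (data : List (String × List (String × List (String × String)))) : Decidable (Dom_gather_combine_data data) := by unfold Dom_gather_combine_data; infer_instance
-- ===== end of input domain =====

-- B replaces A's per-measure rescan of all companies by ONE streaming pass over the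
-- sorted companies, appending each company's value to every existing measure row and
-- opening N/A-backfilled rows for new measures; return values proved equal on Pre_.

-- shared dict-on-assoc-list primitives (Python dict semantics: first-match lookup,
-- keys in first-occurrence order)
def pvDictGet? {α : Type} (d : List (String × α)) (k : String) : Option α :=
  PySem.Dict.get? ⟨d⟩ k

def pvDictGetD {α : Type} (d : List (String × α)) (k : String) (dflt : α) : α :=
  (pvDictGet? d k).getD dflt

def pvDictKeys {α : Type} (d : List (String × α)) : List String :=
  PySem.List.dedup (d.map Prod.fst)

-- data[c][sorted(data[c])[-1]]  (both Pythons contain this exact expression;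
-- sorted(...)[-1] on an empty year dict raises IndexError in Python: excluded by Pre_,
-- here the pyGet? none case falls back to a default)
def pvLatestOf (data : List (String × List (String × List (String × String)))) (c : String) :
    List (String × String) :=
  let yd := pvDictGetD data c []
  pvDictGetD yd ((PySem.List.pyGet? (PySem.List.sorted (pvDictKeys yd) (fun x => x)) (-1)).getD "") []

-- ===== PORT A =====
def gather_combine_data (data : List (String × List (String × List (String × String)))) : List (List String) :=
  let companies := PySem.List.sorted (pvDictKeys data) (fun x => x)
  let header := [["ticker"] ++ companies]
  let r := companies.foldl (fun (st : List (List String) × List String) cie =>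
      (pvDictKeys (pvLatestOf data cie)).foldl (fun st measure =>
        if st.2.contains measure then st
        else
          let row := companies.foldl (fun r cie2 =>
              match pvDictGet? (pvLatestOf data cie2) measure with
              | some v => r ++ [v]
              | none => r ++ ["N/A"]) [measure]
          (st.1 ++ [row], st.2 ++ [measure])) st)
    (([], []) : List (List String) × List String)
  header ++ r.1

-- ===== PORT B =====
-- one company step of B's streaming loop: append this company's value (or "N/A") to
-- every existing row, then open a backfilled row for each measure not seen before
def pvStepB (data : List (String × List (String × List (String × String))))
    (rows : List (String × List String)) (i : Nat) (c : String) : List (String × List String) :=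
  let d := pvLatestOf data c
  let rows1 := rows.map (fun p => (p.1, p.2 ++ [(pvDictGet? d p.1).getD "N/A"]))
  (pvDictKeys d).foldl (fun r m =>
      if (r.map Prod.fst).contains m then r
      else r ++ [(m, List.replicate i "N/A" ++ [(pvDictGet? d m).getD "N/A"])]) rows1

def gather_combine_data_alt (data : List (String × List (String × List (String × String)))) : List (List String) :=
  let companies := PySem.List.sorted (pvDictKeys data) (fun x => x)
  let rows := (companies.foldl
      (fun (st : List (String × List String) × Nat) c => (pvStepB data st.1 st.2 c, st.2 + 1))
      (([], 0) : List (String × List String) × Nat)).1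
  [["ticker"] ++ companies] ++ rows.map (fun p => [p.1] ++ p.2)

-- ===== PRECONDITION & SPEC =====
-- Python A raises IndexError (sorted(data[cie].keys())[-1] on an empty list) exactly when
-- some company's year dict is empty; Pre_ excludes those inputs (B raises there too).
def Pre_gather_combine_data (data : List (String × List (String × List (String × String)))) : Prop :=
  ∀ c ∈ data.map Prod.fst, pvDictGetD data c [] ≠ []

instance (data : List (String × List (String × List (String × String)))) : Decidable (Pre_gather_combine_data data) := by unfold Pre_gather_combine_data; infer_instance

def pvWitness_gather_combine_data : (List (String × List (String × List (String × String)))) :=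
  [("AAPL", [("2020", [("rev", "1"), ("eps", "2")])]),
   ("MSFT", [("2019", [("rev", "3")]), ("2021", [("roe", "4")])])]

def Spec_gather_combine_data (data : List (String × List (String × List (String × String)))) (out : List (List String)) : Prop := out = gather_combine_data_alt data
instance (data : List (String × List (String × List (String × String)))) (out : List (List String)) : Decidable (Spec_gather_combine_data data out) := by unfold Spec_gather_combine_data; infer_instance

-- ===== CLAIM (what is proved, stated in full; the proofs are below) =====
def Claim_equal_gather_combine_data : Prop := ∀ (data : List (String × List (String × List (String × String)))), Dom_gather_combine_data data → Pre_gather_combine_data data → Spec_gather_combine_data data (gather_combine_data data)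

-- ===== LEMMAS AND PROOFS =====

-- measures of a company's latest dict / A's full row for a measure, as functions
def pvMF (data : List (String × List (String × List (String × String)))) : String → List String :=
  fun c => pvDictKeys (pvLatestOf data c)

def pvG (data : List (String × List (String × List (String × String)))) (m c : String) : String :=
  (pvDictGet? (pvLatestOf data c) m).getD "N/A"

def pvRow (data : List (String × List (String × List (String × String)))) (companies : List String) (m : String) : List String :=
  [m] ++ companies.map (fun c => pvG data m c)

-- the new measures contributed by one key list, given already-processed ps
def pvDelta (ps : List String) : List String → List String
  | [] => []
  | m :: ms => if ps.contains m then pvDelta ps ms else m :: pvDelta (ps ++ [m]) ms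

-- chained over a list of companies
def pvDeltaL (f : String → List String) (ps : List String) : List String → List String
  | [] => []
  | c :: L => pvDelta ps (f c) ++ pvDeltaL f (ps ++ pvDelta ps (f c)) L

-- ---------- A-side characterisation ----------

-- A's row-building inner fold is init ++ map
theorem pv_row_fold (data : List (String × List (String × List (String × String)))) (m : String) :
    ∀ (L : List String) (init : List String),
      L.foldl (fun r cie2 =>
          match pvDictGet? (pvLatestOf data cie2) m with
          | some v => r ++ [v]
          | none => r ++ ["N/A"]) init
        = init ++ L.map (fun c => pvG data m c) := by
  intro L
  induction L with
  | nil => intro init; simp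
  | cons c L ih =>
    intro init
    simp only [List.foldl_cons, List.map_cons]
    cases h : pvDictGet? (pvLatestOf data c) m <;>
      simp [ih, pvG, h]

-- A's measure loop for one company
theorem pv_inner_fold (data : List (String × List (String × List (String × String)))) (companies : List String) :
    ∀ (ms : List String) (rs : List (List String)) (ps : List String),
      ms.foldl (fun (st : List (List String) × List String) measure =>
        if st.2.contains measure then st
        else
          (st.1 ++ [companies.foldl (fun r cie2 =>
              match pvDictGet? (pvLatestOf data cie2) measure with
              | some v => r ++ [v]
              | none => r ++ ["N/A"]) [measure]], st.2 ++ [measure])) (rs, ps)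
      = (rs ++ (pvDelta ps ms).map (pvRow data companies), ps ++ pvDelta ps ms) := by
  intro ms
  induction ms with
  | nil => intro rs ps; simp [pvDelta]
  | cons m ms ih =>
    intro rs ps
    simp only [List.foldl_cons]
    by_cases h : ps.contains m = true
    · have h' : m ∈ ps := by simpa using h
      rw [if_pos h, ih]
      simp [pvDelta, h']
    · have h' : m ∉ ps := by simpa using h
      rw [if_neg h, ih]
      simp [pvDelta, h', pvRow, pv_row_fold, List.append_assoc]

-- A's outer company loop
theorem pv_outer_fold (data : List (String × List (String × List (String × String)))) (companies : List String) :
    ∀ (L : List String) (rs : List (List String)) (ps : List String),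
      L.foldl (fun (st : List (List String) × List String) cie =>
        (pvDictKeys (pvLatestOf data cie)).foldl (fun st measure =>
          if st.2.contains measure then st
          else
            (st.1 ++ [companies.foldl (fun r cie2 =>
                match pvDictGet? (pvLatestOf data cie2) measure with
                | some v => r ++ [v]
                | none => r ++ ["N/A"]) [measure]], st.2 ++ [measure])) st) (rs, ps)
      = (rs ++ (pvDeltaL (pvMF data) ps L).map (pvRow data companies), ps ++ pvDeltaL (pvMF data) ps L) := by
  intro L
  induction L with
  | nil => intro rs ps; simp [pvDeltaL]
  | cons c L ih =>
    intro rs ps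
    simp only [List.foldl_cons]
    rw [pv_inner_fold, ih]
    simp [pvDeltaL, pvMF, List.append_assoc]

-- ---------- pvDelta / pvDeltaL facts ----------

theorem pv_delta_not_mem {ps ms : List String} {m : String} (h : m ∈ pvDelta ps ms) : m ∉ ps := by
  induction ms generalizing ps with
  | nil => simp [pvDelta] at h
  | cons x ms ih =>
    simp only [pvDelta] at h
    by_cases hx : ps.contains x = true
    · rw [if_pos hx] at h
      exact ih h
    · rw [if_neg hx] at h
      rcases List.mem_cons.mp h with h | h
      · subst h; simpa using hx
      · intro hm
        exact ih h (by simp [hm])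

theorem pv_delta_complete {ps ms : List String} {m : String} (h : m ∈ ms) : m ∈ ps ++ pvDelta ps ms := by
  induction ms generalizing ps with
  | nil => simp at h
  | cons x ms ih =>
    simp only [pvDelta]
    by_cases hx : ps.contains x = true
    · rw [if_pos hx]
      rcases List.mem_cons.mp h with h | h
      · subst h; simp [List.mem_append]; left; simpa using hx
      · exact ih h
    · rw [if_neg hx]
      rcases List.mem_cons.mp h with h | h
      · subst h; simp
      · have := ih (ps := ps ++ [x]) h
        simp only [List.mem_append, List.mem_cons] at this ⊢
        tauto

theorem pv_deltaL_complete (f : String → List String) {m c : String} (hm : m ∈ f c) :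
    ∀ (P : List String) (ps : List String), c ∈ P → m ∈ ps ++ pvDeltaL f ps P := by
  intro P
  induction P with
  | nil => intro ps h; simp at h
  | cons x P ih =>
    intro ps hc
    simp only [pvDeltaL]
    rcases List.mem_cons.mp hc with h | h
    · subst h
      have := pv_delta_complete (ps := ps) hm
      simp only [List.mem_append] at this ⊢
      tauto
    · have := ih (ps ++ pvDelta ps (f x)) h
      simp only [List.mem_append] at this ⊢
      tauto

theorem pv_deltaL_append_singleton (f : String → List String) (c : String) :
    ∀ (P : List String) (ps : List String),
      pvDeltaL f ps (P ++ [c]) = pvDeltaL f ps P ++ pvDelta (ps ++ pvDeltaL f ps P) (f c) := by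
  intro P
  induction P with
  | nil => intro ps; simp [pvDeltaL]
  | cons x P ih =>
    intro ps
    simp only [List.cons_append, pvDeltaL]
    rw [ih]
    simp [List.append_assoc]

-- ---------- B-side characterisation ----------

-- first-match lookup misses exactly the keys absent from the dedup'd key list
theorem pv_get?_eq_none {α : Type} (d : List (String × α)) (k : String) (h : k ∉ pvDictKeys d) :
    pvDictGet? d k = none := by
  induction d with
  | nil => rfl
  | cons p d ih =>
    obtain ⟨k1, v1⟩ := p
    simp only [pvDictKeys, List.map_cons, PySem.List.dedup_eq_ofList] at h ih
    have h1 : k ≠ k1 := by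
      intro he; exact h (by simp [PySem.Set.mem_ofList, he])
    have h2 : k ∉ PySem.Set.ofList (d.map Prod.fst) := by
      intro hk; exact h (by simp [PySem.Set.mem_ofList] at hk ⊢; tauto)
    have hb : (k1 == k) = false := by simpa using (Ne.symm h1)
    simpa [pvDictGet?, PySem.Dict.get?_mk_cons, hb] using ih h2

-- B's new-measure loop appends exactly the pvDelta of the current keys
theorem pv_newkeys_fold (nr : String → List String) :
    ∀ (ms : List String) (r0 : List (String × List String)),
      ms.foldl (fun r m => if (r.map Prod.fst).contains m then r else r ++ [(m, nr m)]) r0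
        = r0 ++ (pvDelta (r0.map Prod.fst) ms).map (fun m => (m, nr m)) := by
  intro ms
  induction ms with
  | nil => intro r0; simp [pvDelta]
  | cons m ms ih =>
    intro r0
    simp only [List.foldl_cons, pvDelta]
    by_cases h : (r0.map Prod.fst).contains m = true
    · rw [if_pos h, if_pos (by simpa using h), ih]
    · rw [if_neg h, if_neg (by simpa using h)]
      rw [ih (r0 ++ [(m, nr m)])]
      simp [List.append_assoc]

-- B's whole streaming fold, characterised row by row
theorem pv_B_fold (data : List (String × List (String × List (String × String)))) :
    ∀ (P : List String),
      P.foldl (fun (st : List (String × List String) × Nat) c => (pvStepB data st.1 st.2 c, st.2 + 1))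
          (([], 0) : List (String × List String) × Nat)
        = ((pvDeltaL (pvMF data) [] P).map (fun m => (m, P.map (fun c => pvG data m c))), P.length) := by
  intro P
  induction P using List.reverseRecOn with
  | nil => simp [pvDeltaL]
  | append_singleton P c ih =>
    rw [List.foldl_append, ih]
    simp only [List.foldl_cons, List.foldl_nil]
    refine Prod.ext ?_ (by simp)
    unfold pvStepB
    simp only [List.map_map]
    rw [pv_newkeys_fold]
    rw [pv_deltaL_append_singleton]
    simp only [List.nil_append, List.map_append]
    congr 1
    -- (the updated existing rows equal the old-measure part definitionally; the
    -- remaining goal is the new-measure part, whose key list must be simplified)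
    rw [show List.map Prod.fst
          (List.map ((fun p => (p.1, p.2 ++ [(pvDictGet? (pvLatestOf data c) p.1).getD "N/A"])) ∘
              fun m => (m, List.map (fun c => pvG data m c) P)) (pvDeltaL (pvMF data) [] P))
          = pvDeltaL (pvMF data) [] P from by simp [Function.comp_def]]
    apply List.map_congr_left
    intro m hm
    have hnew : m ∉ pvDeltaL (pvMF data) [] P := by
      have := pv_delta_not_mem hm
      simpa using this
    have hrep : P.map (fun c' => pvG data m c') = List.replicate P.length "N/A" := by
      rw [List.eq_replicate_iff]
      refine ⟨by simp, ?_⟩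
      intro b hb
      rcases List.mem_map.mp hb with ⟨c', hc', hbe⟩
      have hmc' : m ∉ pvMF data c' := by
        intro hmf
        exact hnew (by simpa using pv_deltaL_complete (pvMF data) hmf P [] hc')
      have := pv_get?_eq_none (pvLatestOf data c') m (by simpa [pvMF] using hmc')
      simpa [pvG, this] using hbe.symm
    rw [← hrep]
    simp [pvG]

-- ===== VERDICT (by name: the statement is the Claim_ definition above) =====
theorem gather_combine_data_spec : Claim_equal_gather_combine_data := by
  intro data _hdom _hpre
  unfold Spec_gather_combine_data gather_combine_data gather_combine_data_alt
  simp only []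
  rw [pv_outer_fold data, pv_B_fold data]
  simp only [List.nil_append]
  congr 1
  rw [List.map_map]
  apply List.map_congr_left
  intro m _
  simp [Function.comp, pvRow]
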